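-- pv_equiv track=rewrite | github.com/hyunjongkimmath/mathbook | mathbook/utility/string.py | replace_string_by_indices
-- ===== SOURCE A (Python) =====
-- def replace_string_by_indices(string, replace_ranges, replace_with):
--     "Replace parts of ``string`` at the specified locations"
--     if isinstance(replace_with, str):
--         replace_ranges = [replace_ranges]
--         replace_with = [replace_with]
--     assert len(replace_ranges) == len(replace_with)
--     if len(replace_ranges) == 0:
--         return string
--     str_parts = []
--     for i in range(len(replace_ranges)):
--         replace_string = replace_with[i]
--         if i > 0:
--             if len(replace_ranges[i-1]) == 1:
--                 unreplaced_start_index = len(string)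
--             else:
--                 unreplaced_start_index = replace_ranges[i-1][1]
--         else:
--             unreplaced_start_index = 0
--         #unreplaced_start_index = replace_ranges[i-1][1] if i > 0 else 0
--         unreplaced_end_index = replace_ranges[i][0]
--         str_parts.append(string[unreplaced_start_index:unreplaced_end_index])
--         str_parts.append(replace_string)
--
--     # Add the last (unreplaced) part to str_parts.
--     if len(replace_ranges[-1]) == 1:
--         unreplaced_start_index = len(string)
--     else:
--         unreplaced_start_index = replace_ranges[-1][1]
--     str_parts.append(string[unreplaced_start_index:])
--     return "".join(str_parts)
-- ===== SOURCE B (Python) =====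
-- def replace_string_by_indices(string, replace_ranges, replace_with):
--     "Replace parts of ``string`` at the specified locations"
--     if isinstance(replace_with, str):
--         replace_ranges = [replace_ranges]
--         replace_with = [replace_with]
--     assert len(replace_ranges) == len(replace_with)
--     # Build the result back-to-front: walk the pairs in reverse, prepending each
--     # replacement and the untouched gap that follows it; `nxt` is the start of
--     # the range processed just before (i.e. the next range in forward order).
--     acc = ""
--     nxt = None
--     for rng, rep in zip(reversed(replace_ranges), reversed(replace_with)):
--         end = len(string) if len(rng) == 1 else rng[1]
--         acc = rep + string[end:nxt] + acc
--         nxt = rng[0]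
--     return string[:nxt] + acc
-- ===== Notes on version B (the rewrite author's own statement) =====
-- stated objective: alternative
-- what changed: Builds the result back-to-front: iterates the (range, replacement) pairs in reverse, prepending each replacement and the untouched gap after it onto a suffix accumulator, instead of A's forward pass that looks backward at the previous range, collects parts in a list with a duplicated tail block and joins them.
import Mathlib
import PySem

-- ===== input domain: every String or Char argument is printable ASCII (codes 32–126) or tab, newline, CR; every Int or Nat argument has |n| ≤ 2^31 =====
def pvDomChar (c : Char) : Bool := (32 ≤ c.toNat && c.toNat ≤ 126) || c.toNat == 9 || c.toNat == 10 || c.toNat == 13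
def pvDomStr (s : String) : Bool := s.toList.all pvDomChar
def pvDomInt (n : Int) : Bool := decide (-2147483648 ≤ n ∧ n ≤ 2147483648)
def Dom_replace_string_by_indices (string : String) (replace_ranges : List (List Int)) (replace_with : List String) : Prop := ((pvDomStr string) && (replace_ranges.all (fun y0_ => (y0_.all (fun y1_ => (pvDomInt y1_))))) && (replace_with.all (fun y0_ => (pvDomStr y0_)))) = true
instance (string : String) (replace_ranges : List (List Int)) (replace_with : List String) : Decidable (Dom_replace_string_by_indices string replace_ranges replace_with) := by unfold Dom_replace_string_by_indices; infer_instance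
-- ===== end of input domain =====

-- B builds the result BACK-TO-FRONT: it walks the (range, replacement) pairs in reverse, prepending
-- each replacement and the untouched gap after it onto an accumulator string, so A's forward pass
-- with its backward previous-range look-up, parts list, join and duplicated tail block disappear;
-- objective: alternative (same cost, different construction order).

-- ===== PORT A =====
-- literal transliteration of A; the isinstance(replace_with, str) branch cannot fire under the type
-- convention (replace_with : List String), so it has no counterpart here.
def replace_string_by_indices (string : String) (replace_ranges : List (List Int)) (replace_with : List String) : String :=
  if replace_ranges.length = 0 then string
  else
    let str_parts := (PySem.List.pyRange 0 (replace_ranges.length : Int) 1).foldl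
      (fun acc i =>
        let replace_string := PySem.List.pyGetD replace_with i ""
        let unreplaced_start_index : Int :=
          if 0 < i then
            if (PySem.List.pyGetD replace_ranges (i - 1) []).length = 1 then
              PySem.Str.len string
            else
              PySem.List.pyGetD (PySem.List.pyGetD replace_ranges (i - 1) []) 1 0
          else 0
        let unreplaced_end_index := PySem.List.pyGetD (PySem.List.pyGetD replace_ranges i []) 0 0
        acc ++ [PySem.Str.slice string (some unreplaced_start_index) (some unreplaced_end_index),
                replace_string])
      []
    -- Add the last (unreplaced) part to str_parts.
    let unreplaced_start_index : Int :=
      if (PySem.List.pyGetD replace_ranges (-1) []).length = 1 then PySem.Str.len string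
      else PySem.List.pyGetD (PySem.List.pyGetD replace_ranges (-1) []) 1 0
    PySem.Str.join "" (str_parts ++ [PySem.Str.slice string (some unreplaced_start_index) none])

-- ===== PORT B =====
-- Source B's reversed loop, as a foldl over zip(reversed(ranges), reversed(withs)) carrying (acc, nxt);
-- Python's `s[end:nxt]` with nxt possibly None is Str.slice with an Option stop.
def replace_string_by_indices_alt (string : String) (replace_ranges : List (List Int)) (replace_with : List String) : String :=
  let st := (replace_ranges.reverse.zip replace_with.reverse).foldl
    (fun (st : String × Option Int) p =>
      let e : Int := if p.1.length = 1 then PySem.Str.len string else PySem.List.pyGetD p.1 1 0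
      (p.2 ++ PySem.Str.slice string (some e) st.2 ++ st.1, some (PySem.List.pyGetD p.1 0 0)))
    ("", none)
  PySem.Str.slice string none st.2 ++ st.1

-- ===== PRECONDITION & SPEC =====
-- Pre_ excludes exactly the inputs where A raises: a length mismatch (the assert → AssertionError)
-- and an empty inner range (rng[0] → IndexError). B raises on exactly the same inputs.
def Pre_replace_string_by_indices (string : String) (replace_ranges : List (List Int)) (replace_with : List String) : Prop :=
  replace_ranges.length = replace_with.length ∧ ∀ r ∈ replace_ranges, r ≠ []

instance (string : String) (replace_ranges : List (List Int)) (replace_with : List String) : Decidable (Pre_replace_string_by_indices string replace_ranges replace_with) := by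
  unfold Pre_replace_string_by_indices; infer_instance

def pvWitness_replace_string_by_indices : String × List (List Int) × List String :=
  ("hello world", [[0, 5], [6]], ["bye", "moon"])

def Spec_replace_string_by_indices (string : String) (replace_ranges : List (List Int)) (replace_with : List String) (out : String) : Prop := out = replace_string_by_indices_alt string replace_ranges replace_with
instance (string : String) (replace_ranges : List (List Int)) (replace_with : List String) (out : String) : Decidable (Spec_replace_string_by_indices string replace_ranges replace_with out) := by unfold Spec_replace_string_by_indices; infer_instance

-- ===== CLAIM (what is proved, stated in full; the proofs are below) =====
def Claim_equal_replace_string_by_indices : Prop := ∀ (string : String) (replace_ranges : List (List Int)) (replace_with : List String), Dom_replace_string_by_indices string replace_ranges replace_with → Pre_replace_string_by_indices string replace_ranges replace_with → Spec_replace_string_by_indices string replace_ranges replace_with (replace_string_by_indices string replace_ranges replace_with)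

-- ===== LEMMAS AND PROOFS =====

-- the "unreplaced start after range r" computation shared by both ports
def pvNext (string : String) (r : List Int) : Int :=
  if r.length = 1 then PySem.Str.len string else PySem.List.pyGetD r 1 0

-- A's i-th two-part chunk, with the i = 0 start generalized from 0 to c
def pvChunk (string : String) (c : Int) (rs : List (List Int)) (ws : List String) (i : Int) : List String :=
  [PySem.Str.slice string
      (some (if 0 < i then pvNext string (PySem.List.pyGetD rs (i - 1) []) else c))
      (some (PySem.List.pyGetD (PySem.List.pyGetD rs i []) 0 0)),
   PySem.List.pyGetD ws i ""]

-- A's list of parts from cursor c on, as one forward recursion over the zipped pairs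
def pvAltGo (string : String) (cursor : Int) : List (List Int × String) → List String
  | [] => [PySem.Str.slice string (some cursor) none]
  | (rng, rep) :: rest =>
      PySem.Str.slice string (some cursor) (some (PySem.List.pyGetD rng 0 0)) :: rep ::
      pvAltGo string (pvNext string rng) rest

-- the same value as ONE string, still from cursor c forward
def pvAfwd (string : String) (cursor : Int) : List (List Int × String) → String
  | [] => PySem.Str.slice string (some cursor) none
  | (rng, rep) :: rest =>
      PySem.Str.slice string (some cursor) (some (PySem.List.pyGetD rng 0 0)) ++ rep ++
      pvAfwd string (pvNext string rng) rest

-- B's loop body (st = (acc, nxt)), named so the lemmas can speak about it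
def pvBStep (string : String) (st : String × Option Int) (p : List Int × String) : String × Option Int :=
  (p.2 ++ PySem.Str.slice string (some (if p.1.length = 1 then PySem.Str.len string else PySem.List.pyGetD p.1 1 0)) st.2 ++ st.1,
   some (PySem.List.pyGetD p.1 0 0))

lemma pvGetD_cons_succ {α : Type} (x : α) (xs : List α) (k : Nat) (d : α) :
    PySem.List.pyGetD (x :: xs) ((k : Int) + 1) d = PySem.List.pyGetD xs (k : Int) d := by
  have h : ((k : Int) + 1) = (((k + 1 : Nat)) : Int) := by push_cast; ring
  rw [h, PySem.List.pyGetD_natCast, PySem.List.pyGetD_natCast]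
  rfl

lemma pvChunk_succ (string : String) (c : Int) (r : List Int) (rs : List (List Int))
    (w : String) (ws : List String) (k : Nat) :
    pvChunk string c (r :: rs) (w :: ws) ((k : Int) + 1) =
      pvChunk string (pvNext string r) rs ws (k : Int) := by
  unfold pvChunk
  have h1 : ((k : Int) + 1) - 1 = (k : Int) := by omega
  rw [h1, if_pos (by omega : (0:Int) < (k:Int) + 1), pvGetD_cons_succ, pvGetD_cons_succ]
  cases k with
  | zero =>
      rw [if_neg (by omega)]
      norm_num [PySem.List.pyGetD_natCast]
  | succ j =>
      have hc : (((j + 1 : Nat)) : Int) = (j : Int) + 1 := by push_cast; ring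
      rw [hc, if_pos (by omega : (0:Int) < (j:Int) + 1), pvGetD_cons_succ]
      have h3 : ((j : Int) + 1) - 1 = (j : Int) := by omega
      rw [h3]

-- main invariant on A's side: A's chunk concatenation plus its tail part is the forward recursion
lemma pvMain (string : String) (rs : List (List Int)) : ∀ (ws : List String) (c : Int),
    rs.length = ws.length → rs ≠ [] →
    (List.range rs.length).flatMap (fun (k : Nat) => pvChunk string c rs ws (k : Int)) ++
      [PySem.Str.slice string (some (pvNext string (PySem.List.pyGetD rs (-1) []))) none] =
    pvAltGo string c (rs.zip ws) := by
  induction rs with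
  | nil => intro ws c _ h; exact absurd rfl h
  | cons r rs ih =>
    intro ws c hlen _
    cases ws with
    | nil => simp at hlen
    | cons w ws =>
      have hfun : (fun (k : Nat) => pvChunk string c (r :: rs) (w :: ws) (((k + 1 : Nat)) : Int)) =
          fun (k : Nat) => pvChunk string (pvNext string r) rs ws (k : Int) := by
        funext k
        rw [show (((k + 1 : Nat)) : Int) = (k : Int) + 1 by push_cast; ring, pvChunk_succ]
      have hhead : pvChunk string c (r :: rs) (w :: ws) ((0 : Nat) : Int) =
          [PySem.Str.slice string (some c) (some (PySem.List.pyGetD r 0 0)), w] := by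
        simp [pvChunk]
      rw [List.length_cons, List.range_succ_eq_map]
      rw [List.flatMap_cons, List.flatMap_map]
      rw [hhead, hfun]
      cases rs with
      | nil =>
          cases ws with
          | nil =>
              simp [pvAltGo, pvNext, PySem.List.pyGetD_neg_one]
          | cons w2 ws2 => simp at hlen
      | cons r2 rs2 =>
          cases ws with
          | nil => simp at hlen
          | cons w2 ws2 =>
              have htail : PySem.List.pyGetD (r :: r2 :: rs2) (-1) ([] : List Int) =
                  PySem.List.pyGetD (r2 :: rs2) (-1) ([] : List Int) := by
                rw [PySem.List.pyGetD_neg_one _ _ (by simp), PySem.List.pyGetD_neg_one _ _ (by simp)]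
                exact List.getLast_cons _
              rw [htail]
              have hrec := ih (w2 :: ws2) (pvNext string r) (by simpa using hlen) (by simp)
              have hz : pvAltGo string c ((r :: r2 :: rs2).zip (w :: w2 :: ws2)) =
                  PySem.Str.slice string (some c) (some (PySem.List.pyGetD r 0 0)) :: w ::
                    pvAltGo string (pvNext string r) ((r2 :: rs2).zip (w2 :: ws2)) := rfl
              rw [hz, ← hrec]
              simp

-- joining char lists with the empty separator is flattening
lemma pvIntercalateNil (L : List (List Char)) : [].intercalate L = L.flatten := by
  induction L with
  | nil => rfl
  | cons a t ih =>
    cases t with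
    | nil => simp [List.intercalate]
    | cons b u => simp_all [List.intercalate, List.intersperse]

-- ''.join as characters
lemma pvJoinChars (L : List String) :
    (PySem.Str.join "" L).toList = (L.map String.toList).flatten := by
  rw [PySem.Str.toList_join]
  exact pvIntercalateNil _

-- ''.join of the forward parts list is the forward string
lemma pvJoinAfwd (string : String) : ∀ (pairs : List (List Int × String)) (c : Int),
    PySem.Str.join "" (pvAltGo string c pairs) = pvAfwd string c pairs := by
  intro pairs
  induction pairs with
  | nil =>
      intro c
      apply String.toList_injective
      simp [pvAltGo, pvAfwd]
  | cons p rest ih =>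
      intro c
      obtain ⟨rng, rep⟩ := p
      apply String.toList_injective
      have htl := congrArg String.toList (ih (pvNext string rng))
      simp only [pvJoinChars, pvAltGo, pvAfwd, List.map_cons, List.flatten_cons,
        String.toList_append] at htl ⊢
      rw [htl, List.append_assoc]

-- zipping the reverses is reversing the zip (equal lengths)
lemma pvZipReverse {α β : Type} (l1 : List α) (l2 : List β) (h : l1.length = l2.length) :
    l1.reverse.zip l2.reverse = (l1.zip l2).reverse := by
  induction l1 generalizing l2 with
  | nil => cases l2 <;> simp_all
  | cons a t ih =>
    cases l2 with
    | nil => simp_all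
    | cons b u =>
      have h' : t.length = u.length := by simp_all
      simp only [List.reverse_cons, List.zip_cons_cons]
      rw [List.zip_append (by simp [h']), ih u h']
      simp

-- B's right fold (= its loop over the reversed pairs) computes the forward string
lemma pvFoldrB (string : String) : ∀ (pairs : List (List Int × String)) (c : Int),
    PySem.Str.slice string (some c) (pairs.foldr (fun p st => pvBStep string st p) ("", none)).2 ++
      (pairs.foldr (fun p st => pvBStep string st p) ("", none)).1 =
    pvAfwd string c pairs := by
  intro pairs
  induction pairs with
  | nil =>
      intro c
      apply String.toList_injective
      simp [pvAfwd]
  | cons p rest ih =>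
      intro c
      obtain ⟨rng, rep⟩ := p
      have ih' := ih (pvNext string rng)
      simp only [List.foldr_cons, pvBStep, pvAfwd, pvNext] at ih' ⊢
      rw [← ih']
      simp [String.append_assoc]

-- a slice starting at 0 is a slice with no start
lemma pvSliceZero (s : String) (b? : Option Int) :
    PySem.Str.slice s none b? = PySem.Str.slice s (some 0) b? := by
  apply String.toList_injective
  simp [PySem.Str.toList_slice]

-- ===== VERDICT (by name: the statement is the Claim_ definition above) =====
theorem replace_string_by_indices_spec : Claim_equal_replace_string_by_indices := by
  intro string rs ws _ hpre
  obtain ⟨hlen, _⟩ := hpre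
  unfold Spec_replace_string_by_indices replace_string_by_indices replace_string_by_indices_alt
  have halt :
      (let st := (rs.reverse.zip ws.reverse).foldl
        (fun (st : String × Option Int) p =>
          let e : Int := if p.1.length = 1 then PySem.Str.len string else PySem.List.pyGetD p.1 1 0
          (p.2 ++ PySem.Str.slice string (some e) st.2 ++ st.1, some (PySem.List.pyGetD p.1 0 0)))
        ("", none)
       PySem.Str.slice string none st.2 ++ st.1) = pvAfwd string 0 (rs.zip ws) := by
    show PySem.Str.slice string none _ ++ _ = _
    rw [show (fun (st : String × Option Int) (p : List Int × String) =>
          (p.2 ++ PySem.Str.slice string (some (if p.1.length = 1 then PySem.Str.len string else PySem.List.pyGetD p.1 1 0)) st.2 ++ st.1,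
           some (PySem.List.pyGetD p.1 0 0))) = pvBStep string from rfl]
    rw [pvZipReverse rs ws hlen, List.foldl_reverse, pvSliceZero]
    exact pvFoldrB string (rs.zip ws) 0
  rw [halt]
  by_cases h : rs.length = 0
  · rw [if_pos h]
    have hnil : rs = [] := List.eq_nil_of_length_eq_zero h
    subst hnil
    apply String.toList_injective
    simp [pvAfwd]
  · rw [if_neg h]
    have hne : rs ≠ [] := fun hn => h (by simp [hn])
    have hfold :
        (PySem.List.pyRange 0 (rs.length : Int) 1).foldl
          (fun acc i => acc ++ pvChunk string 0 rs ws i) [] =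
          (List.range rs.length).flatMap (fun (k : Nat) => pvChunk string 0 rs ws (k : Int)) := by
      rw [PySem.List.foldl_append_eq_flatMap, List.nil_append, PySem.List.pyRange_one,
          List.flatMap_map]
      norm_num
    calc PySem.Str.join ""
          ((PySem.List.pyRange 0 (rs.length : Int) 1).foldl
            (fun acc i => acc ++ pvChunk string 0 rs ws i) [] ++
           [PySem.Str.slice string (some (pvNext string (PySem.List.pyGetD rs (-1) []))) none])
        = PySem.Str.join ""
            ((List.range rs.length).flatMap (fun (k : Nat) => pvChunk string 0 rs ws (k : Int)) ++
             [PySem.Str.slice string (some (pvNext string (PySem.List.pyGetD rs (-1) []))) none]) := by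
          rw [hfold]
      _ = PySem.Str.join "" (pvAltGo string 0 (rs.zip ws)) := by
          rw [pvMain string rs ws 0 hlen hne]
      _ = pvAfwd string 0 (rs.zip ws) := pvJoinAfwd string (rs.zip ws) 0
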